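-- pv_equiv track=rewrite | github.com/jessionlin/csqa | utils/edit_distance.py | diff_seq
-- ===== SOURCE A (Python) =====
-- def edit_distance(lst1, lst2):
--     """
--     0 插入
--     1 删除
--     2 替换
--     3 无操作
--     """
--     m = [[i+j for i in range(len(lst2)+1)] for j in range(len(lst1)+1)]
--     c = [[3 for i in range(len(lst2)+1)] for j in range(len(lst1)+1)]
--
--     for i in range(len(lst1)+1):
--         c[i][0] = 0
--     for j in range(len(lst2)+1):
--         c[0][j] = 1
--
--     for i in range(1, len(lst1)+1):
--         for j in range(1, len(lst2)+1):
--             if lst1[i-1] == lst2[j-1]: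
--                 d = 0
--             else:
--                 d = 1
--             m[i][j] = min(m[i-1][j]+1, m[i][j-1]+1, m[i-1][j-1]+d)
--
--             if m[i][j] == m[i-1][j] + 1:
--                 c[i][j] = 0
--             elif m[i][j] == m[i][j-1] + 1:
--                 c[i][j] = 1
--             elif d == 1:
--                 c[i][j] = 2
--
--     return m, c
--
-- def diff_seq(lst1, lst2):
--     x = len(lst1)
--     y = len(lst2)
--     m, c = edit_distance(lst1, lst2)
--     res_seq = [[0 for i in lst1], [0 for i in lst2]]
--     while True:
--         if c[x][y] == 0:
--             res_seq[0][x-1] = 1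
--             x = x - 1
--         elif c[x][y] == 1:
--             res_seq[1][y-1] = 1
--             y = y - 1
--         elif c[x][y] == 2:
--             res_seq[0][x-1] = 1
--             res_seq[1][y-1] = 1
--             x = x - 1
--             y = y - 1
--         else:
--             x = x - 1
--             y = y - 1
--
--         if x == y == 0:
--             break
--     return res_seq
-- ===== SOURCE B (Python) =====
-- def diff_seq(lst1, lst2):
--     # Wavefront DP: the distance table is computed anti-diagonal by
--     # anti-diagonal (each diagonal from the previous two), stored as a list
--     # of diagonals; no direction matrix is kept.  The traceback recomputes
--     # each move from the distances (A's priority: delete, insert,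
--     # substitute, match) and the marker rows are rendered from index sets.
--     n1, n2 = len(lst1), len(lst2)
--     diags = []
--     for s in range(n1 + n2 + 1):
--         lo = max(0, s - n2)
--         hi = min(n1, s)
--         lo1 = max(0, s - 1 - n2)
--         lo2 = max(0, s - 2 - n2)
--         cur = []
--         for i in range(lo, hi + 1):
--             j = s - i
--             if i == 0:
--                 cur.append(j)
--             elif j == 0:
--                 cur.append(i)
--             else:
--                 up = diags[s - 1][i - 1 - lo1] + 1
--                 left = diags[s - 1][i - lo1] + 1
--                 diag = diags[s - 2][i - 1 - lo2] + (1 if lst1[i - 1] != lst2[j - 1] else 0)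
--                 cur.append(min(up, left, diag))
--         diags.append(cur)
--
--     def ed(i, j):
--         return diags[i + j][i - max(0, i + j - n2)]
--
--     dels, ins = set(), set()
--     x, y = n1, n2
--     while x > 0 or y > 0:
--         if x > 0 and (y == 0 or ed(x, y) == ed(x - 1, y) + 1):
--             dels.add(x - 1)
--             x -= 1
--         elif y > 0 and (x == 0 or ed(x, y) == ed(x, y - 1) + 1):
--             ins.add(y - 1)
--             y -= 1
--         else:
--             if lst1[x - 1] != lst2[y - 1]:
--                 dels.add(x - 1)
--                 ins.add(y - 1)
--             x -= 1
--             y -= 1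
--     return [[1 if i in dels else 0 for i in range(n1)],
--             [1 if j in ins else 0 for j in range(n2)]]
-- ===== Notes on version B (the rewrite author's own statement) =====
-- stated objective: alternative
-- what changed: B replaces A's row-major m/c matrix construction entirely: it computes the distance table as a wavefront, anti-diagonal by anti-diagonal (each diagonal built from the previous two, stored as a list of diagonals with offset indexing), keeps no direction matrix, recomputes each traceback move from the distances with A's priority, and renders the marker rows from index sets.
-- crash fix: On two empty lists A raises IndexError (the do-while body writes res_seq[1][-1] into an empty list) while B returns [[], []]. — e.g. on diff_seq([], []): A raises IndexError, B returns [[], []]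
import Mathlib
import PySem

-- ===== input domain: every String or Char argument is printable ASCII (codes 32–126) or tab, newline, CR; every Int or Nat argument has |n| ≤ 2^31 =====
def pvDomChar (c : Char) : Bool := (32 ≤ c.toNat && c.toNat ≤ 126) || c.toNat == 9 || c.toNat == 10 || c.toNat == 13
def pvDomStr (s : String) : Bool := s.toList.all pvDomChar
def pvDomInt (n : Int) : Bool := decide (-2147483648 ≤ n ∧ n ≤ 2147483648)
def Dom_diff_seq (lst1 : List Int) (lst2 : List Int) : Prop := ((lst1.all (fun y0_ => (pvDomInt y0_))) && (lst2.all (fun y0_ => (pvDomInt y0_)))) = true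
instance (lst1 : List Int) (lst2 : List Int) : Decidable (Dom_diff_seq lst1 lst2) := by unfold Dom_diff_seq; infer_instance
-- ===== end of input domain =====

-- B computes the distance table as a wavefront of anti-diagonals (no direction
-- matrix, no row-major m) and recomputes the traceback moves from the distances.

-- ===== PORT A =====
-- matrix read m[i][j] / write m[i][j] = v; all indices used by the ports are
-- in range and nonnegative, where Lean's getD/set are exact for Python indexing
def pvGet2 (m : List (List Int)) (i j : Nat) : Int := (m.getD i []).getD j 0
def pvSet2 (m : List (List Int)) (i j : Nat) (v : Int) : List (List Int) :=
  m.set i ((m.getD i []).set j v)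

def edit_distance (lst1 lst2 : List Int) : List (List Int) × List (List Int) :=
  let m0 := (List.range (lst1.length + 1)).map
      (fun (j : Nat) => (List.range (lst2.length + 1)).map (fun (i : Nat) => ((i : Int) + (j : Int))))
  let c0 := (List.range (lst1.length + 1)).map
      (fun _ => (List.range (lst2.length + 1)).map (fun _ => (3 : Int)))
  let c1 := (List.range (lst1.length + 1)).foldl (fun c i => pvSet2 c i 0 0) c0
  let c2 := (List.range (lst2.length + 1)).foldl (fun c j => pvSet2 c 0 j 1) c1
  (List.range lst1.length).foldl (fun st i0 =>
    (List.range lst2.length).foldl (fun st j0 =>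
      let i := i0 + 1
      let j := j0 + 1
      let d : Int := if lst1.getD (i - 1) 0 = lst2.getD (j - 1) 0 then 0 else 1
      let m' := pvSet2 st.1 i j
        (min (min (pvGet2 st.1 (i - 1) j + 1) (pvGet2 st.1 i (j - 1) + 1))
             (pvGet2 st.1 (i - 1) (j - 1) + d))
      let c' := if pvGet2 m' i j = pvGet2 m' (i - 1) j + 1 then pvSet2 st.2 i j 0
                else if pvGet2 m' i j = pvGet2 m' i (j - 1) + 1 then pvSet2 st.2 i j 1
                else if d = 1 then pvSet2 st.2 i j 2
                else st.2
      (m', c')) st) (m0, c2)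

-- A's do-while traceback; the fuel (x+y suffices: every iteration decreases x+y)
-- only makes the recursion total — it is never exhausted on inputs admitted by Pre_.
-- x, y are Nats: on the states diff_seq reaches they never go below 0 in Python.
def pvTraceA : Nat → List (List Int) → List Int → List Int → Nat → Nat → List Int × List Int
  | 0, _, r0, r1, _, _ => (r0, r1)
  | f + 1, c, r0, r1, x, y =>
    let cv := pvGet2 c x y
    let s : List Int × List Int × Nat × Nat :=
      if cv = 0 then (r0.set (x - 1) 1, r1, x - 1, y)
      else if cv = 1 then (r0, r1.set (y - 1) 1, x, y - 1)
      else if cv = 2 then (r0.set (x - 1) 1, r1.set (y - 1) 1, x - 1, y - 1)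
      else (r0, r1, x - 1, y - 1)
    if s.2.2.1 = 0 ∧ s.2.2.2 = 0 then (s.1, s.2.1)
    else pvTraceA f c s.1 s.2.1 s.2.2.1 s.2.2.2

def diff_seq (lst1 : List Int) (lst2 : List Int) : List (List Int) :=
  let x := lst1.length
  let y := lst2.length
  let mc := edit_distance lst1 lst2
  let r0 := lst1.map (fun _ => (0 : Int))
  let r1 := lst2.map (fun _ => (0 : Int))
  let s := pvTraceA (x + y) mc.2 r0 r1 x y
  [s.1, s.2]

-- ===== PORT B =====
-- the wavefront: diags[s] is the anti-diagonal {(i, s-i)} of the distance table,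
-- built left to right from the two previous diagonals (Nat subtraction is
-- Python's max(0, ·) on the offsets)
def pvDiagsB (lst1 lst2 : List Int) : List (List Int) :=
  (List.range (lst1.length + lst2.length + 1)).foldl (fun diags s =>
    let lo := s - lst2.length
    let hi := min lst1.length s
    let lo1 := s - 1 - lst2.length
    let lo2 := s - 2 - lst2.length
    let cur := (List.range' lo (hi + 1 - lo)).foldl (fun cur i =>
      let j := s - i
      if i = 0 then cur ++ [(j : Int)]
      else if j = 0 then cur ++ [(i : Int)]
      else
        let up := (diags.getD (s - 1) []).getD (i - 1 - lo1) 0 + 1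
        let left := (diags.getD (s - 1) []).getD (i - lo1) 0 + 1
        let diag := (diags.getD (s - 2) []).getD (i - 1 - lo2) 0 +
          (if lst1.getD (i - 1) 0 ≠ lst2.getD (j - 1) 0 then 1 else 0)
        cur ++ [min (min up left) diag]) []
    diags ++ [cur]) []

-- ed(i, j) looked up in the wavefront
def pvEdB (diags : List (List Int)) (n2 i j : Nat) : Int :=
  (diags.getD (i + j) []).getD (i - (i + j - n2)) 0

-- B's while-loop traceback over index sets; fuel x+y bounds the iteration count.
def pvTraceB (diags : List (List Int)) (lst1 lst2 : List Int) :
    Nat → Nat → Nat → PySem.Set Nat → PySem.Set Nat → PySem.Set Nat × PySem.Set Nat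
  | 0, _, _, dels, ins => (dels, ins)
  | f + 1, x, y, dels, ins =>
    if x = 0 ∧ y = 0 then (dels, ins)
    else if 0 < x ∧ (y = 0 ∨ pvEdB diags lst2.length x y = pvEdB diags lst2.length (x - 1) y + 1) then
      pvTraceB diags lst1 lst2 f (x - 1) y (PySem.Set.add dels (x - 1)) ins
    else if 0 < y ∧ (x = 0 ∨ pvEdB diags lst2.length x y = pvEdB diags lst2.length x (y - 1) + 1) then
      pvTraceB diags lst1 lst2 f x (y - 1) dels (PySem.Set.add ins (y - 1))
    else
      let di := if lst1.getD (x - 1) 0 ≠ lst2.getD (y - 1) 0 then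
          (PySem.Set.add dels (x - 1), PySem.Set.add ins (y - 1))
        else (dels, ins)
      pvTraceB diags lst1 lst2 f (x - 1) (y - 1) di.1 di.2

def diff_seq_alt (lst1 : List Int) (lst2 : List Int) : List (List Int) :=
  let diags := pvDiagsB lst1 lst2
  let di := pvTraceB diags lst1 lst2 (lst1.length + lst2.length) lst1.length lst2.length
      PySem.Set.empty PySem.Set.empty
  [(List.range lst1.length).map (fun i => if i ∈ di.1 then (1 : Int) else 0),
   (List.range lst2.length).map (fun j => if j ∈ di.2 then (1 : Int) else 0)]

-- ===== PRECONDITION & SPEC =====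
-- A raises IndexError iff both lists are empty (the do-while body runs once and
-- writes res_seq[1][-1] into an empty list); Pre_ excludes exactly that input.
def Pre_diff_seq (lst1 : List Int) (lst2 : List Int) : Prop := ¬(lst1 = [] ∧ lst2 = [])
instance (lst1 : List Int) (lst2 : List Int) : Decidable (Pre_diff_seq lst1 lst2) := by
  unfold Pre_diff_seq; infer_instance

def pvWitness_diff_seq : List Int × List Int := ([1, 3], [1, 2])

-- On two empty lists A raises IndexError (res_seq[1][-1] into an empty list); B returns [[], []].
def Raises_diff_seq (lst1 : List Int) (lst2 : List Int) : Prop := lst1 = [] ∧ lst2 = []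
instance (lst1 : List Int) (lst2 : List Int) : Decidable (Raises_diff_seq lst1 lst2) := by
  unfold Raises_diff_seq; infer_instance
def pvRaiseWitness_diff_seq : List Int × List Int := ([], [])
def pvRaiseWitnessOut_diff_seq : List (List Int) := [[], []]

def Spec_diff_seq (lst1 : List Int) (lst2 : List Int) (out : List (List Int)) : Prop :=
  out = diff_seq_alt lst1 lst2
instance (lst1 : List Int) (lst2 : List Int) (out : List (List Int)) :
    Decidable (Spec_diff_seq lst1 lst2 out) := by unfold Spec_diff_seq; infer_instance

-- ===== CLAIM (what is proved, stated in full; the proofs are below) =====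
def Claim_equal_diff_seq : Prop := ∀ (lst1 : List Int) (lst2 : List Int),
  Dom_diff_seq lst1 lst2 → Pre_diff_seq lst1 lst2 → Spec_diff_seq lst1 lst2 (diff_seq lst1 lst2)

def Claim_raises_diff_seq : Prop :=
  (∀ (lst1 : List Int) (lst2 : List Int), Dom_diff_seq lst1 lst2 → Raises_diff_seq lst1 lst2 → ¬ Pre_diff_seq lst1 lst2) ∧
  (Dom_diff_seq (pvRaiseWitness_diff_seq.1) (pvRaiseWitness_diff_seq.2) ∧
   Raises_diff_seq (pvRaiseWitness_diff_seq.1) (pvRaiseWitness_diff_seq.2) ∧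
   diff_seq_alt (pvRaiseWitness_diff_seq.1) (pvRaiseWitness_diff_seq.2) = pvRaiseWitnessOut_diff_seq)

-- ===== LEMMAS AND PROOFS =====

-- substitution cost d at cell (i, j), i, j ≥ 1
def pvD (lst1 lst2 : List Int) (i j : Nat) : Int :=
  if lst1.getD (i - 1) 0 = lst2.getD (j - 1) 0 then 0 else 1

-- the edit-distance value both ports compute
def pvEd (lst1 lst2 : List Int) : Nat → Nat → Int
  | 0, j => j
  | i + 1, 0 => (i : Int) + 1
  | i + 1, j + 1 =>
      min (min (pvEd lst1 lst2 i (j + 1) + 1) (pvEd lst1 lst2 (i + 1) j + 1))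
          (pvEd lst1 lst2 i j + pvD lst1 lst2 (i + 1) (j + 1))
  termination_by i j => (i, j)

-- A's direction code at an interior cell (i, j ≥ 1)
def pvCdec (lst1 lst2 : List Int) (i j : Nat) : Int :=
  if pvEd lst1 lst2 i j = pvEd lst1 lst2 (i - 1) j + 1 then 0
  else if pvEd lst1 lst2 i j = pvEd lst1 lst2 i (j - 1) + 1 then 1
  else if pvD lst1 lst2 i j = 1 then 2
  else 3

-- full direction function of A's c matrix
def pvCF (lst1 lst2 : List Int) (i j : Nat) : Int :=
  if i = 0 then 1 else if j = 0 then 0 else pvCdec lst1 lst2 i j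

def pvMat (n1 n2 : Nat) (f : Nat → Nat → Int) : List (List Int) :=
  (List.range (n1 + 1)).map (fun i => (List.range (n2 + 1)).map (f i))

-- partially-filled m / c functions: rows ≤ k done, in row k+1 columns ≤ l done
def pvFM (lst1 lst2 : List Int) (k l : Nat) (i j : Nat) : Int :=
  if i ≤ k ∨ (i = k + 1 ∧ j ≤ l) then pvEd lst1 lst2 i j else (i : Int) + (j : Int)

def pvGC (lst1 lst2 : List Int) (k l : Nat) (i j : Nat) : Int :=
  if i = 0 then 1 else if j = 0 then 0
  else if i ≤ k ∨ (i = k + 1 ∧ j ≤ l) then pvCdec lst1 lst2 i j else 3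

theorem pvEd_zero_left (lst1 lst2 : List Int) (j : Nat) : pvEd lst1 lst2 0 j = j := by
  simp [pvEd]

theorem pvEd_zero_right (lst1 lst2 : List Int) (i : Nat) : pvEd lst1 lst2 i 0 = i := by
  cases i <;> simp [pvEd]

theorem pvGet2_mat {n1 n2 i j : Nat} (f : Nat → Nat → Int) (hi : i ≤ n1) (hj : j ≤ n2) :
    pvGet2 (pvMat n1 n2 f) i j = f i j := by
  simp [pvGet2, pvMat, List.getD, hi, hj]


theorem pvSet2_mat {n1 n2 i j : Nat} (f : Nat → Nat → Int) (v : Int)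
    (hi : i ≤ n1) (hj : j ≤ n2) :
    pvSet2 (pvMat n1 n2 f) i j v
      = pvMat n1 n2 (fun a b => if a = i ∧ b = j then v else f a b) := by
  have hi' : i < n1 + 1 := Nat.lt_succ_of_le hi
  have hj' : j < n2 + 1 := Nat.lt_succ_of_le hj
  have hrow : (pvMat n1 n2 f).getD i [] = (List.range (n2 + 1)).map (f i) := by
    simp [pvMat, List.getD, hi']
  rw [pvSet2, hrow]
  apply List.ext_getElem
  · simp [pvMat]
  intro a ha _
  simp only [pvMat, List.length_set, List.length_map, List.length_range] at ha ⊢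
  rw [List.getElem_set]
  by_cases hai : i = a
  · subst hai
    simp only [List.getElem_map, List.getElem_range, if_true, true_and]
    apply List.ext_getElem
    · simp
    intro b hb _
    simp only [List.length_set, List.length_map, List.length_range] at hb
    rw [List.getElem_set]
    simp only [List.getElem_map, List.getElem_range]
    by_cases hbj : j = b
    · subst hbj; simp
    · have hbj' : ¬(b = j) := fun h => hbj h.symm
      simp [hbj, hbj']
  · simp only [if_neg hai, List.getElem_map, List.getElem_range]
    apply List.map_congr_left
    intro b hb
    have : ¬(a = i ∧ b = j) := fun h => hai h.1.symm
    simp [this]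

theorem pvMat_congr {n1 n2 : Nat} {f g : Nat → Nat → Int}
    (h : ∀ i, i ≤ n1 → ∀ j, j ≤ n2 → f i j = g i j) : pvMat n1 n2 f = pvMat n1 n2 g := by
  unfold pvMat
  apply List.map_congr_left
  intro i hi
  apply List.map_congr_left
  intro j hj
  exact h i (Nat.lt_succ_iff.mp (List.mem_range.mp hi)) j (Nat.lt_succ_iff.mp (List.mem_range.mp hj))

def pvRender (n : Nat) (s : PySem.Set Nat) : List Int :=
  (List.range n).map (fun i => if i ∈ s then (1 : Int) else 0)

theorem pvRender_add {n x : Nat} (s : PySem.Set Nat) (hx : x < n) :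
    pvRender n (PySem.Set.add s x) = (pvRender n s).set x 1 := by
  apply List.ext_getElem
  · simp [pvRender]
  intro a ha _
  simp only [pvRender, List.length_map, List.length_range] at ha
  rw [List.getElem_set]
  simp only [pvRender, List.getElem_map, List.getElem_range]
  by_cases hax : x = a
  · subst hax; simp [PySem.Set.mem_add]
  · have : a ∈ PySem.Set.add s x ↔ a ∈ s := by
      rw [PySem.Set.mem_add]
      exact or_iff_left (fun h => hax h.symm)
    simp [this, hax]


-- column-0 initialisation of c
theorem pvStage1 (lst1 lst2 : List Int) (k : Nat) (hk : k ≤ lst1.length + 1) :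
    (List.range k).foldl (fun c i => pvSet2 c i 0 0)
        (pvMat lst1.length lst2.length (fun _ _ => (3 : Int)))
      = pvMat lst1.length lst2.length (fun i j => if i < k ∧ j = 0 then 0 else 3) := by
  induction k with
  | zero => simp [List.range_zero]
  | succ k ih =>
    rw [List.range_succ, List.foldl_append, ih (by omega), List.foldl_cons, List.foldl_nil,
      pvSet2_mat _ _ (by omega) (by omega)]
    apply pvMat_congr
    intro i _ j _
    by_cases h1 : i = k ∧ j = 0 <;> by_cases h2 : i < k ∧ j = 0 <;>
      simp [h1, h2] <;> omega

-- row-0 initialisation of c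
theorem pvStage2 (lst1 lst2 : List Int) (k : Nat) (hk : k ≤ lst2.length + 1) :
    (List.range k).foldl (fun c j => pvSet2 c 0 j 1)
        (pvMat lst1.length lst2.length (fun i j => if i < lst1.length + 1 ∧ j = 0 then 0 else 3))
      = pvMat lst1.length lst2.length
          (fun i j => if i = 0 ∧ j < k then 1 else if j = 0 then 0 else 3) := by
  induction k with
  | zero =>
    rw [List.range_zero, List.foldl_nil]
    apply pvMat_congr
    intro i hi j _
    simp [Nat.lt_succ_of_le hi]
  | succ k ih =>
    rw [List.range_succ, List.foldl_append, ih (by omega), List.foldl_cons, List.foldl_nil,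
      pvSet2_mat _ _ (by omega) (by omega)]
    apply pvMat_congr
    intro i _ j _
    by_cases h1 : i = 0 ∧ j = k <;> by_cases h2 : i = 0 ∧ j < k <;>
      simp [h1, h2] <;> omega


theorem pvFM_set (lst1 lst2 : List Int) (k l : Nat) (hk : k < lst1.length)
    (hl : l < lst2.length) (v : Int) (hv : v = pvEd lst1 lst2 (k + 1) (l + 1)) :
    pvSet2 (pvMat lst1.length lst2.length (pvFM lst1 lst2 k l)) (k + 1) (l + 1) v
      = pvMat lst1.length lst2.length (pvFM lst1 lst2 k (l + 1)) := by
  rw [pvSet2_mat _ _ (by omega) (by omega)]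
  apply pvMat_congr
  intro a ha b hb
  by_cases hab : a = k + 1 ∧ b = l + 1
  · rw [if_pos hab, hv]
    obtain ⟨h1, h2⟩ := hab; subst h1; subst h2
    simp [pvFM]
  · rw [if_neg hab]
    have hiff : (a ≤ k ∨ (a = k + 1 ∧ b ≤ l)) ↔ (a ≤ k ∨ (a = k + 1 ∧ b ≤ l + 1)) := by omega
    simp only [pvFM, hiff]

theorem pvGC_set (lst1 lst2 : List Int) (k l : Nat) (hk : k < lst1.length)
    (hl : l < lst2.length) (v : Int) (hv : v = pvCdec lst1 lst2 (k + 1) (l + 1)) :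
    pvSet2 (pvMat lst1.length lst2.length (pvGC lst1 lst2 k l)) (k + 1) (l + 1) v
      = pvMat lst1.length lst2.length (pvGC lst1 lst2 k (l + 1)) := by
  rw [pvSet2_mat _ _ (by omega) (by omega)]
  apply pvMat_congr
  intro a ha b hb
  by_cases hab : a = k + 1 ∧ b = l + 1
  · rw [if_pos hab, hv]
    obtain ⟨h1, h2⟩ := hab; subst h1; subst h2
    simp [pvGC]
  · rw [if_neg hab]
    have hiff : (a ≤ k ∨ (a = k + 1 ∧ b ≤ l)) ↔ (a ≤ k ∨ (a = k + 1 ∧ b ≤ l + 1)) := by omega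
    simp only [pvGC, hiff]

theorem pvGC_untouched (lst1 lst2 : List Int) (k l : Nat) (hk : k < lst1.length)
    (hl : l < lst2.length) (hv : pvCdec lst1 lst2 (k + 1) (l + 1) = 3) :
    pvMat lst1.length lst2.length (pvGC lst1 lst2 k l)
      = pvMat lst1.length lst2.length (pvGC lst1 lst2 k (l + 1)) := by
  apply pvMat_congr
  intro a ha b hb
  by_cases hab : a = k + 1 ∧ b = l + 1
  · obtain ⟨h1, h2⟩ := hab; subst h1; subst h2
    simp [pvGC, hv]
  · have hiff : (a ≤ k ∨ (a = k + 1 ∧ b ≤ l)) ↔ (a ≤ k ∨ (a = k + 1 ∧ b ≤ l + 1)) := by omega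
    simp only [pvGC, hiff]

-- one interior cell of the main double loop
theorem pvCell (lst1 lst2 : List Int) (k l : Nat) (hk : k < lst1.length) (hl : l < lst2.length) :
    (let i := k + 1
     let j := l + 1
     let d : Int := if lst1.getD (i - 1) 0 = lst2.getD (j - 1) 0 then 0 else 1
     let m' := pvSet2 (pvMat lst1.length lst2.length (pvFM lst1 lst2 k l)) i j
       (min (min (pvGet2 (pvMat lst1.length lst2.length (pvFM lst1 lst2 k l)) (i - 1) j + 1)
                 (pvGet2 (pvMat lst1.length lst2.length (pvFM lst1 lst2 k l)) i (j - 1) + 1))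
            (pvGet2 (pvMat lst1.length lst2.length (pvFM lst1 lst2 k l)) (i - 1) (j - 1) + d))
     let c' := if pvGet2 m' i j = pvGet2 m' (i - 1) j + 1 then
         pvSet2 (pvMat lst1.length lst2.length (pvGC lst1 lst2 k l)) i j 0
       else if pvGet2 m' i j = pvGet2 m' i (j - 1) + 1 then
         pvSet2 (pvMat lst1.length lst2.length (pvGC lst1 lst2 k l)) i j 1
       else if d = 1 then pvSet2 (pvMat lst1.length lst2.length (pvGC lst1 lst2 k l)) i j 2
       else pvMat lst1.length lst2.length (pvGC lst1 lst2 k l)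
     ((m', c') : List (List Int) × List (List Int)))
    = (pvMat lst1.length lst2.length (pvFM lst1 lst2 k (l + 1)),
       pvMat lst1.length lst2.length (pvGC lst1 lst2 k (l + 1))) := by
  have n1 := lst1.length
  dsimp only
  simp only [Nat.add_sub_cancel]
  rw [pvGet2_mat _ (by omega) (by omega), pvGet2_mat _ (by omega) (by omega),
      pvGet2_mat _ (by omega) (by omega)]
  have fm1 : pvFM lst1 lst2 k l k (l + 1) = pvEd lst1 lst2 k (l + 1) := by simp [pvFM]
  have fm2 : pvFM lst1 lst2 k l (k + 1) l = pvEd lst1 lst2 (k + 1) l := by simp [pvFM]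
  have fm3 : pvFM lst1 lst2 k l k l = pvEd lst1 lst2 k l := by simp [pvFM]
  rw [fm1, fm2, fm3]
  have hd : (if lst1.getD k 0 = lst2.getD l 0 then (0 : Int) else 1)
      = pvD lst1 lst2 (k + 1) (l + 1) := by simp [pvD]
  rw [hd]
  have hv : min (min (pvEd lst1 lst2 k (l + 1) + 1) (pvEd lst1 lst2 (k + 1) l + 1))
      (pvEd lst1 lst2 k l + pvD lst1 lst2 (k + 1) (l + 1)) = pvEd lst1 lst2 (k + 1) (l + 1) := by
    rw [pvEd]
  rw [hv, pvFM_set lst1 lst2 k l hk hl _ rfl]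
  have g1 : pvGet2 (pvMat lst1.length lst2.length (pvFM lst1 lst2 k (l + 1))) (k + 1) (l + 1)
      = pvEd lst1 lst2 (k + 1) (l + 1) := by
    rw [pvGet2_mat _ (by omega) (by omega)]; simp [pvFM]
  have g2 : pvGet2 (pvMat lst1.length lst2.length (pvFM lst1 lst2 k (l + 1))) k (l + 1)
      = pvEd lst1 lst2 k (l + 1) := by
    rw [pvGet2_mat _ (by omega) (by omega)]; simp [pvFM]
  have g3 : pvGet2 (pvMat lst1.length lst2.length (pvFM lst1 lst2 k (l + 1))) (k + 1) l
      = pvEd lst1 lst2 (k + 1) l := by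
    rw [pvGet2_mat _ (by omega) (by omega)]; simp [pvFM]
  rw [g1, g2, g3]
  refine Prod.ext rfl ?_
  dsimp only
  by_cases h0 : pvEd lst1 lst2 (k + 1) (l + 1) = pvEd lst1 lst2 k (l + 1) + 1
  · rw [if_pos h0, pvGC_set lst1 lst2 k l hk hl _ ?_]
    unfold pvCdec; simp only [Nat.add_sub_cancel]; rw [if_pos h0]
  · rw [if_neg h0]
    by_cases h1 : pvEd lst1 lst2 (k + 1) (l + 1) = pvEd lst1 lst2 (k + 1) l + 1
    · rw [if_pos h1, pvGC_set lst1 lst2 k l hk hl _ ?_]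
      unfold pvCdec; simp only [Nat.add_sub_cancel]; rw [if_neg h0, if_pos h1]
    · rw [if_neg h1]
      by_cases h2 : pvD lst1 lst2 (k + 1) (l + 1) = 1
      · rw [if_pos h2, pvGC_set lst1 lst2 k l hk hl _ ?_]
        unfold pvCdec; simp only [Nat.add_sub_cancel]; rw [if_neg h0, if_neg h1, if_pos h2]
      · rw [if_neg h2]
        exact pvGC_untouched lst1 lst2 k l hk hl (by
          unfold pvCdec; simp only [Nat.add_sub_cancel]; rw [if_neg h0, if_neg h1, if_neg h2])

-- the inner loop fills row k+1 up to column l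
theorem pvInner (lst1 lst2 : List Int) (k : Nat) (hk : k < lst1.length) (l : Nat)
    (hl : l ≤ lst2.length) :
    (List.range l).foldl (fun st j0 =>
      let i := k + 1
      let j := j0 + 1
      let d : Int := if lst1.getD (i - 1) 0 = lst2.getD (j - 1) 0 then 0 else 1
      let m' := pvSet2 st.1 i j
        (min (min (pvGet2 st.1 (i - 1) j + 1) (pvGet2 st.1 i (j - 1) + 1))
             (pvGet2 st.1 (i - 1) (j - 1) + d))
      let c' := if pvGet2 m' i j = pvGet2 m' (i - 1) j + 1 then pvSet2 st.2 i j 0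
                else if pvGet2 m' i j = pvGet2 m' i (j - 1) + 1 then pvSet2 st.2 i j 1
                else if d = 1 then pvSet2 st.2 i j 2
                else st.2
      ((m', c') : List (List Int) × List (List Int)))
      (pvMat lst1.length lst2.length (pvFM lst1 lst2 k 0),
       pvMat lst1.length lst2.length (pvGC lst1 lst2 k 0))
      = (pvMat lst1.length lst2.length (pvFM lst1 lst2 k l),
         pvMat lst1.length lst2.length (pvGC lst1 lst2 k l)) := by
  induction l with
  | zero => rw [List.range_zero, List.foldl_nil]
  | succ l ih =>
    rw [List.range_succ, List.foldl_append, ih (by omega), List.foldl_cons, List.foldl_nil]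
    exact pvCell lst1 lst2 k l hk (by omega)

-- the outer loop fills rows 1..k
theorem pvOuter (lst1 lst2 : List Int) (k : Nat) (hk : k ≤ lst1.length) :
    (List.range k).foldl (fun st i0 =>
      (List.range lst2.length).foldl (fun st j0 =>
        let i := i0 + 1
        let j := j0 + 1
        let d : Int := if lst1.getD (i - 1) 0 = lst2.getD (j - 1) 0 then 0 else 1
        let m' := pvSet2 st.1 i j
          (min (min (pvGet2 st.1 (i - 1) j + 1) (pvGet2 st.1 i (j - 1) + 1))
               (pvGet2 st.1 (i - 1) (j - 1) + d))
        let c' := if pvGet2 m' i j = pvGet2 m' (i - 1) j + 1 then pvSet2 st.2 i j 0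
                  else if pvGet2 m' i j = pvGet2 m' i (j - 1) + 1 then pvSet2 st.2 i j 1
                  else if d = 1 then pvSet2 st.2 i j 2
                  else st.2
        ((m', c') : List (List Int) × List (List Int))) st)
      (pvMat lst1.length lst2.length (pvFM lst1 lst2 0 0),
       pvMat lst1.length lst2.length (pvGC lst1 lst2 0 0))
      = (pvMat lst1.length lst2.length (pvFM lst1 lst2 k 0),
         pvMat lst1.length lst2.length (pvGC lst1 lst2 k 0)) := by
  induction k with
  | zero => rw [List.range_zero, List.foldl_nil]
  | succ k ih =>
    rw [List.range_succ, List.foldl_append, ih (by omega), List.foldl_cons, List.foldl_nil]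
    rw [pvInner lst1 lst2 k (by omega) lst2.length le_rfl]
    refine Prod.ext ?_ ?_ <;> dsimp only
    · apply pvMat_congr
      intro a ha b hb
      by_cases c1 : a ≤ k ∨ (a = k + 1 ∧ b ≤ lst2.length)
      · have c2 : a ≤ k + 1 ∨ (a = k + 1 + 1 ∧ b ≤ 0) := by omega
        simp only [pvFM, if_pos c1, if_pos c2]
      · by_cases c2 : a ≤ k + 1 ∨ (a = k + 1 + 1 ∧ b ≤ 0)
        · have hb0 : b = 0 := by omega
          have ha2 : a = k + 2 := by omega
          subst hb0
          simp only [pvFM, if_neg c1, if_pos c2, pvEd_zero_right]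
          simp
        · simp only [pvFM, if_neg c1, if_neg c2]
    · apply pvMat_congr
      intro a ha b hb
      by_cases hb0 : b = 0
      · subst hb0
        by_cases ha0 : a = 0 <;> simp [pvGC, ha0]
      · have hiff : (a ≤ k ∨ (a = k + 1 ∧ b ≤ lst2.length)) ↔
            (a ≤ k + 1 ∨ (a = k + 1 + 1 ∧ b ≤ 0)) := by omega
        simp only [pvGC, hiff]

-- A's matrices characterised
theorem edit_distance_eq (lst1 lst2 : List Int) :
    edit_distance lst1 lst2
      = (pvMat lst1.length lst2.length (pvEd lst1 lst2),
         pvMat lst1.length lst2.length (pvCF lst1 lst2)) := by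
  unfold edit_distance
  dsimp only
  have hc0 : ((List.range (lst1.length + 1)).map
      (fun _ => (List.range (lst2.length + 1)).map (fun _ => (3 : Int))))
      = pvMat lst1.length lst2.length (fun _ _ => 3) := rfl
  rw [hc0, pvStage1 lst1 lst2 (lst1.length + 1) le_rfl,
    pvStage2 lst1 lst2 (lst2.length + 1) le_rfl]
  have hgc : pvMat lst1.length lst2.length
      (fun i j => if i = 0 ∧ j < lst2.length + 1 then 1 else if j = 0 then 0 else 3)
      = pvMat lst1.length lst2.length (pvGC lst1 lst2 0 0) := by
    apply pvMat_congr
    intro a ha b hb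
    by_cases ha0 : a = 0
    · simp [pvGC, ha0, Nat.lt_succ_of_le hb]
    · by_cases hb0 : b = 0 <;> simp [pvGC, ha0, hb0]
  have hm0 : ((List.range (lst1.length + 1)).map
      (fun (j : Nat) => (List.range (lst2.length + 1)).map (fun (i : Nat) => ((i : Int) + (j : Int)))))
      = pvMat lst1.length lst2.length (pvFM lst1 lst2 0 0) := by
    have h1 : ((List.range (lst1.length + 1)).map
        (fun (j : Nat) => (List.range (lst2.length + 1)).map (fun (i : Nat) => ((i : Int) + (j : Int)))))
        = pvMat lst1.length lst2.length (fun r c => (c : Int) + (r : Int)) := rfl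
    rw [h1]
    apply pvMat_congr
    intro a ha b hb
    by_cases c1 : a ≤ 0 ∨ (a = 1 ∧ b ≤ 0)
    · rcases c1 with h | ⟨h1', h2'⟩
      · have : a = 0 := by omega
        subst this
        simp [pvFM, pvEd_zero_left]
      · subst h1'
        have : b = 0 := by omega
        subst this
        simp [pvFM, pvEd_zero_right]
    · simp only [pvFM, if_neg c1]
      omega
  rw [hgc, hm0, pvOuter lst1 lst2 lst1.length le_rfl]
  refine Prod.ext ?_ ?_ <;> dsimp only
  · apply pvMat_congr
    intro a ha b hb
    have : a ≤ lst1.length ∨ (a = lst1.length + 1 ∧ b ≤ 0) := Or.inl ha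
    simp only [pvFM, if_pos this]
  · apply pvMat_congr
    intro a ha b hb
    by_cases ha0 : a = 0
    · simp [pvGC, pvCF, ha0]
    · by_cases hb0 : b = 0
      · simp [pvGC, pvCF, ha0, hb0]
      · have hor : a ≤ lst1.length ∨ (a = lst1.length + 1 ∧ b ≤ 0) := Or.inl ha
        simp only [pvGC, pvCF, if_neg ha0, if_neg hb0, if_pos hor]

-- ===== characterisation of B's wavefront =====

-- the intended content of diagonal s
def pvDiagSpec (lst1 lst2 : List Int) (s : Nat) : List Int :=
  (List.range' (s - lst2.length) (min lst1.length s + 1 - (s - lst2.length))).map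
    (fun i => pvEd lst1 lst2 i (s - i))

theorem getD_map_range' (a n p : Nat) (f : Nat → Int) (h : p < n) :
    ((List.range' a n).map f).getD p 0 = f (a + p) := by
  rw [List.getD_eq_getElem?_getD, List.getElem?_map,
    List.getElem?_eq_getElem (by simpa using h)]
  simp

theorem pvDiagSpec_getD (lst1 lst2 : List Int) (s i : Nat) (hlo : s ≤ i + lst2.length)
    (hi : i ≤ lst1.length) (his : i ≤ s) :
    (pvDiagSpec lst1 lst2 s).getD (i - (s - lst2.length)) 0 = pvEd lst1 lst2 i (s - i) := by
  unfold pvDiagSpec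
  rw [getD_map_range' _ _ _ _ (by omega)]
  have : s - lst2.length + (i - (s - lst2.length)) = i := by omega
  rw [this]

-- the inner fold of pvDiagsB builds diagonal s from the spec of the previous two
theorem pvDiagInner (lst1 lst2 : List Int) (s : Nat) (hs : s ≤ lst1.length + lst2.length)
    (diags : List (List Int)) (hd : ∀ t, t < s → diags.getD t [] = pvDiagSpec lst1 lst2 t)
    (u : Nat) (hu : u ≤ min lst1.length s + 1 - (s - lst2.length)) :
    (List.range' (s - lst2.length) u).foldl (fun cur i =>
      let j := s - i
      if i = 0 then cur ++ [(j : Int)]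
      else if j = 0 then cur ++ [(i : Int)]
      else
        let up := (diags.getD (s - 1) []).getD (i - 1 - (s - 1 - lst2.length)) 0 + 1
        let left := (diags.getD (s - 1) []).getD (i - (s - 1 - lst2.length)) 0 + 1
        let diag := (diags.getD (s - 2) []).getD (i - 1 - (s - 2 - lst2.length)) 0 +
          (if lst1.getD (i - 1) 0 ≠ lst2.getD (j - 1) 0 then 1 else 0)
        cur ++ [min (min up left) diag]) []
    = (List.range' (s - lst2.length) u).map (fun i => pvEd lst1 lst2 i (s - i)) := by
  induction u with
  | zero => simp
  | succ u ih =>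
    rw [List.range'_concat, List.foldl_append, List.map_append, ih (by omega),
      List.foldl_cons, List.foldl_nil, List.map_cons, List.map_nil]
    simp only [one_mul]
    set i := s - lst2.length + u with hidef
    have hi1 : i ≤ lst1.length := by omega
    have his : i ≤ s := by omega
    have hloi : s ≤ i + lst2.length := by omega
    by_cases hi0 : i = 0
    · simp [hi0, pvEd_zero_left]
    · rw [if_neg hi0]
      by_cases hj0 : s - i = 0
      · rw [if_pos hj0]
        have : s = i := by omega
        rw [this, Nat.sub_self, pvEd_zero_right]
      · rw [if_neg hj0]
        obtain ⟨k, hk⟩ : ∃ k, i = k + 1 := ⟨i - 1, by omega⟩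
        obtain ⟨l, hl⟩ : ∃ l, s - i = l + 1 := ⟨s - i - 1, by omega⟩
        have hs1 : s - 1 < s := by omega
        have hs2 : s - 2 < s := by omega
        rw [hd (s - 1) hs1, hd (s - 2) hs2]
        have e1 : (pvDiagSpec lst1 lst2 (s - 1)).getD (i - 1 - (s - 1 - lst2.length)) 0
            = pvEd lst1 lst2 (i - 1) (s - i) := by
          have := pvDiagSpec_getD lst1 lst2 (s - 1) (i - 1) (by omega) (by omega) (by omega)
          rw [this]
          congr 1
          omega
        have e2 : (pvDiagSpec lst1 lst2 (s - 1)).getD (i - (s - 1 - lst2.length)) 0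
            = pvEd lst1 lst2 i (s - i - 1) := by
          have := pvDiagSpec_getD lst1 lst2 (s - 1) i (by omega) (by omega) (by omega)
          rw [this]
          congr 1
          omega
        have e3 : (pvDiagSpec lst1 lst2 (s - 2)).getD (i - 1 - (s - 2 - lst2.length)) 0
            = pvEd lst1 lst2 (i - 1) (s - i - 1) := by
          have := pvDiagSpec_getD lst1 lst2 (s - 2) (i - 1) (by omega) (by omega) (by omega)
          rw [this]
          congr 1
          omega
        rw [e1, e2, e3]
        have hde : (if lst1.getD (i - 1) 0 ≠ lst2.getD (s - i - 1) 0 then (1 : Int) else 0)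
            = pvD lst1 lst2 i (s - i) := by
          unfold pvD
          by_cases h : lst1.getD (i - 1) 0 = lst2.getD (s - i - 1) 0 <;> simp [h]
        rw [hde]
        have : min (min (pvEd lst1 lst2 (i - 1) (s - i) + 1) (pvEd lst1 lst2 i (s - i - 1) + 1))
            (pvEd lst1 lst2 (i - 1) (s - i - 1) + pvD lst1 lst2 i (s - i))
            = pvEd lst1 lst2 i (s - i) := by
          rw [show i - 1 = k from by omega, show s - i - 1 = l from by omega, hl, hk]
          rw [show pvEd lst1 lst2 (k+1) (l+1)
              = min (min (pvEd lst1 lst2 k (l + 1) + 1) (pvEd lst1 lst2 (k + 1) l + 1))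
                (pvEd lst1 lst2 k l + pvD lst1 lst2 (k + 1) (l + 1)) from by rw [pvEd]]
        rw [this]

-- the outer fold: the whole wavefront equals the spec diagonals
theorem pvDiags_aux (lst1 lst2 : List Int) (k : Nat)
    (hk : k ≤ lst1.length + lst2.length + 1) :
    (List.range k).foldl (fun diags s =>
      let lo := s - lst2.length
      let hi := min lst1.length s
      let lo1 := s - 1 - lst2.length
      let lo2 := s - 2 - lst2.length
      let cur := (List.range' lo (hi + 1 - lo)).foldl (fun cur i =>
        let j := s - i
        if i = 0 then cur ++ [(j : Int)]
        else if j = 0 then cur ++ [(i : Int)]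
        else
          let up := (diags.getD (s - 1) []).getD (i - 1 - lo1) 0 + 1
          let left := (diags.getD (s - 1) []).getD (i - lo1) 0 + 1
          let diag := (diags.getD (s - 2) []).getD (i - 1 - lo2) 0 +
            (if lst1.getD (i - 1) 0 ≠ lst2.getD (j - 1) 0 then 1 else 0)
          cur ++ [min (min up left) diag]) []
      diags ++ [cur]) []
    = (List.range k).map (pvDiagSpec lst1 lst2) := by
  induction k with
  | zero => simp
  | succ k ih =>
    rw [List.range_succ, List.foldl_append, ih (by omega), List.foldl_cons, List.foldl_nil,
      List.map_append, List.map_cons, List.map_nil]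
    dsimp only
    congr 1
    have hd : ∀ t, t < k → ((List.range k).map (pvDiagSpec lst1 lst2)).getD t []
        = pvDiagSpec lst1 lst2 t := by
      intro t ht
      rw [List.getD_eq_getElem?_getD, List.getElem?_map,
        List.getElem?_eq_getElem (by simpa using ht)]
      simp
    rw [pvDiagInner lst1 lst2 k (by omega) _ hd _ le_rfl]
    unfold pvDiagSpec
    congr 1

theorem pvDiagsB_eq (lst1 lst2 : List Int) :
    pvDiagsB lst1 lst2
      = (List.range (lst1.length + lst2.length + 1)).map (pvDiagSpec lst1 lst2) := by
  unfold pvDiagsB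
  exact pvDiags_aux lst1 lst2 (lst1.length + lst2.length + 1) le_rfl

-- the wavefront lookup returns the edit distance
theorem pvEdB_eq (lst1 lst2 : List Int) (i j : Nat) (hi : i ≤ lst1.length)
    (hj : j ≤ lst2.length) :
    pvEdB (pvDiagsB lst1 lst2) lst2.length i j = pvEd lst1 lst2 i j := by
  unfold pvEdB
  rw [pvDiagsB_eq]
  have hs : i + j < lst1.length + lst2.length + 1 := by omega
  have hrow : (((List.range (lst1.length + lst2.length + 1)).map
      (pvDiagSpec lst1 lst2)).getD (i + j) []) = pvDiagSpec lst1 lst2 (i + j) := by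
    rw [List.getD_eq_getElem?_getD, List.getElem?_map,
      List.getElem?_eq_getElem (by simpa using hs)]
    simp
  rw [hrow]
  have := pvDiagSpec_getD lst1 lst2 (i + j) i (by omega) hi (by omega)
  rw [this]
  congr 1
  omega

-- ===== traceback equivalence =====

theorem pvTraceB_zero (diags : List (List Int)) (lst1 lst2 : List Int) (f : Nat)
    (dels ins : PySem.Set Nat) : pvTraceB diags lst1 lst2 f 0 0 dels ins = (dels, ins) := by
  cases f <;> simp [pvTraceB]

theorem pvTrace_eq (lst1 lst2 : List Int) (diags : List (List Int))
    (hED : ∀ i j, i ≤ lst1.length → j ≤ lst2.length →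
      pvEdB diags lst2.length i j = pvEd lst1 lst2 i j)
    (f x y : Nat) (dels ins : PySem.Set Nat)
    (hx : x ≤ lst1.length) (hy : y ≤ lst2.length) (hnz : ¬(x = 0 ∧ y = 0))
    (hf : x + y ≤ f) :
    pvTraceA f (pvMat lst1.length lst2.length (pvCF lst1 lst2))
        (pvRender lst1.length dels) (pvRender lst2.length ins) x y
      = (pvRender lst1.length (pvTraceB diags lst1 lst2 f x y dels ins).1,
         pvRender lst2.length (pvTraceB diags lst1 lst2 f x y dels ins).2) := by
  induction f generalizing x y dels ins with
  | zero => omega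
  | succ f ih =>
    have hC : pvGet2 (pvMat lst1.length lst2.length (pvCF lst1 lst2)) x y = pvCF lst1 lst2 x y :=
      pvGet2_mat _ hx hy
    have hnz' : ¬(x = 0 ∧ y = 0) := hnz
    rcases Nat.eq_zero_or_pos x with hx0 | hxp
    · -- x = 0, y ≥ 1: direction code 1 (insert)
      subst hx0
      have hy0' : ¬(y = 0) := by omega
      have hgt : 0 < y := by omega
      have hcv : pvGet2 (pvMat lst1.length lst2.length (pvCF lst1 lst2)) 0 y = 1 := by
        rw [hC]; simp [pvCF]
      simp only [pvTraceA]
      rw [hcv]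
      norm_num
      simp only [pvTraceB]
      have hb1 : ¬(True ∧ y = 0) := by simp [hy0']
      have hb2 : ¬(0 < 0 ∧ (y = 0 ∨
          pvEdB diags lst2.length 0 y = pvEdB diags lst2.length (0 - 1) y + 1)) := by simp
      have hb3 : 0 < y ∧ (True ∨
          pvEdB diags lst2.length 0 y = pvEdB diags lst2.length 0 (y - 1) + 1) :=
        ⟨hgt, Or.inl trivial⟩
      rw [if_neg hb1, if_neg hb2, if_pos hb3, ← pvRender_add ins (by omega)]
      by_cases hb : y - 1 = 0
      · rw [if_pos hb, hb, pvTraceB_zero]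
      · rw [if_neg hb]
        exact ih 0 (y - 1) dels (PySem.Set.add ins (y - 1)) (by omega) (by omega)
          (by simp [hb]) (by omega)
    · rcases Nat.eq_zero_or_pos y with hy0 | hyp
      · -- y = 0, x ≥ 1: direction code 0 (delete)
        subst hy0
        have hx0' : ¬(x = 0) := by omega
        have hcv : pvGet2 (pvMat lst1.length lst2.length (pvCF lst1 lst2)) x 0 = 0 := by
          rw [hC]; simp [pvCF]; omega
        simp only [pvTraceA]
        rw [hcv]
        norm_num
        simp only [pvTraceB]
        have hb1 : ¬(x = 0 ∧ True) := by simp [hx0']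
        have hb2 : 0 < x ∧ (True ∨
            pvEdB diags lst2.length x 0 = pvEdB diags lst2.length (x - 1) 0 + 1) :=
          ⟨hxp, Or.inl trivial⟩
        rw [if_neg hb1, if_pos hb2, ← pvRender_add dels (by omega)]
        by_cases hb : x - 1 = 0
        · rw [if_pos hb, hb, pvTraceB_zero]
        · rw [if_neg hb]
          exact ih (x - 1) 0 (PySem.Set.add dels (x - 1)) ins (by omega) (by omega)
            (by simp [hb]) (by omega)
      · -- interior cell
        have hRxy : pvEdB diags lst2.length x y = pvEd lst1 lst2 x y := hED x y hx hy
        have hRx : pvEdB diags lst2.length (x - 1) y = pvEd lst1 lst2 (x - 1) y :=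
          hED (x - 1) y (by omega) hy
        have hRy : pvEdB diags lst2.length x (y - 1) = pvEd lst1 lst2 x (y - 1) :=
          hED x (y - 1) hx (by omega)
        have hx0' : ¬(x = 0) := by omega
        have hy0' : ¬(y = 0) := by omega
        by_cases h0 : pvEd lst1 lst2 x y = pvEd lst1 lst2 (x - 1) y + 1
        · -- delete
          have hcv : pvGet2 (pvMat lst1.length lst2.length (pvCF lst1 lst2)) x y = 0 := by
            rw [hC]; unfold pvCF pvCdec; rw [if_neg hx0', if_neg hy0', if_pos h0]
          simp only [pvTraceA]
          rw [hcv]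
          norm_num
          simp only [pvTraceB]
          have hb1 : 0 < x ∧ (y = 0 ∨
              pvEdB diags lst2.length x y = pvEdB diags lst2.length (x - 1) y + 1) :=
            ⟨hxp, Or.inr (by rw [hRxy, hRx]; exact h0)⟩
          rw [if_neg hnz', if_pos hb1, ← pvRender_add dels (by omega),
            if_neg (show ¬(x - 1 = 0 ∧ y = 0) by omega)]
          exact ih (x - 1) y (PySem.Set.add dels (x - 1)) ins (by omega) hy (by omega) (by omega)
        · have hnb1 : ¬(0 < x ∧ (y = 0 ∨
              pvEdB diags lst2.length x y = pvEdB diags lst2.length (x - 1) y + 1)) := by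
            rw [hRxy, hRx]
            rintro ⟨-, h | h⟩
            · exact hy0' h
            · exact h0 h
          by_cases h1 : pvEd lst1 lst2 x y = pvEd lst1 lst2 x (y - 1) + 1
          · -- insert
            have hcv : pvGet2 (pvMat lst1.length lst2.length (pvCF lst1 lst2)) x y = 1 := by
              rw [hC]; unfold pvCF pvCdec; rw [if_neg hx0', if_neg hy0', if_neg h0, if_pos h1]
            simp only [pvTraceA]
            rw [hcv]
            norm_num
            simp only [pvTraceB]
            have hb2 : 0 < y ∧ (x = 0 ∨
                pvEdB diags lst2.length x y = pvEdB diags lst2.length x (y - 1) + 1) :=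
              ⟨hyp, Or.inr (by rw [hRxy, hRy]; exact h1)⟩
            rw [if_neg hnz', if_neg hnb1, if_pos hb2, ← pvRender_add ins (by omega),
              if_neg (show ¬(x = 0 ∧ y - 1 = 0) by omega)]
            exact ih x (y - 1) dels (PySem.Set.add ins (y - 1)) hx (by omega) (by omega) (by omega)
          · have hnb2 : ¬(0 < y ∧ (x = 0 ∨
                pvEdB diags lst2.length x y = pvEdB diags lst2.length x (y - 1) + 1)) := by
              rw [hRxy, hRy]
              rintro ⟨-, h | h⟩
              · exact hx0' h
              · exact h1 h
            by_cases h2 : pvD lst1 lst2 x y = 1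
            · -- substitution
              have hne : lst1.getD (x - 1) 0 ≠ lst2.getD (y - 1) 0 := by
                intro h
                unfold pvD at h2
                rw [if_pos h] at h2
                exact absurd h2 (by norm_num)
              have hcv : pvGet2 (pvMat lst1.length lst2.length (pvCF lst1 lst2)) x y = 2 := by
                rw [hC]; unfold pvCF pvCdec
                rw [if_neg hx0', if_neg hy0', if_neg h0, if_neg h1, if_pos h2]
              simp only [pvTraceA]
              rw [hcv]
              norm_num
              simp only [pvTraceB]
              rw [if_neg hnz', if_neg hnb1, if_neg hnb2, if_pos hne,
                ← pvRender_add dels (by omega), ← pvRender_add ins (by omega)]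
              by_cases hb : x - 1 = 0 ∧ y - 1 = 0
              · rw [if_pos hb, hb.1, hb.2, pvTraceB_zero]
              · rw [if_neg hb]
                exact ih (x - 1) (y - 1) (PySem.Set.add dels (x - 1)) (PySem.Set.add ins (y - 1))
                  (by omega) (by omega) hb (by omega)
            · -- match
              have heq : ¬(lst1.getD (x - 1) 0 ≠ lst2.getD (y - 1) 0) := by
                intro h
                exact h2 (by unfold pvD; rw [if_neg h])
              have hcv : pvGet2 (pvMat lst1.length lst2.length (pvCF lst1 lst2)) x y = 3 := by
                rw [hC]; unfold pvCF pvCdec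
                rw [if_neg hx0', if_neg hy0', if_neg h0, if_neg h1, if_neg h2]
              simp only [pvTraceA]
              rw [hcv]
              norm_num
              simp only [pvTraceB]
              rw [if_neg hnz', if_neg hnb1, if_neg hnb2, if_neg heq]
              by_cases hb : x - 1 = 0 ∧ y - 1 = 0
              · rw [if_pos hb, hb.1, hb.2, pvTraceB_zero]
              · rw [if_neg hb]
                exact ih (x - 1) (y - 1) dels ins (by omega) (by omega) hb (by omega)

-- ===== VERDICT (by name: the statements are the Claim_ definitions above) =====
theorem diff_seq_spec : Claim_equal_diff_seq := by
  intro lst1 lst2 _ hpre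
  unfold Spec_diff_seq
  simp only [diff_seq, diff_seq_alt]
  rw [edit_distance_eq]
  have hnz : ¬(lst1.length = 0 ∧ lst2.length = 0) := by
    rintro ⟨h1, h2⟩
    exact hpre ⟨List.length_eq_zero_iff.mp h1, List.length_eq_zero_iff.mp h2⟩
  have h0 := pvTrace_eq lst1 lst2 (pvDiagsB lst1 lst2)
      (fun i j hi hj => pvEdB_eq lst1 lst2 i j hi hj)
      (lst1.length + lst2.length) lst1.length lst2.length
      PySem.Set.empty PySem.Set.empty le_rfl le_rfl hnz le_rfl
  have hr0 : pvRender lst1.length PySem.Set.empty = lst1.map (fun _ => (0 : Int)) := by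
    simp [pvRender, PySem.Set.empty, List.map_const']
  have hr1 : pvRender lst2.length PySem.Set.empty = lst2.map (fun _ => (0 : Int)) := by
    simp [pvRender, PySem.Set.empty, List.map_const']
  rw [hr0, hr1] at h0
  rw [h0]
  rfl

@[simp] theorem diff_seq_raises : Claim_raises_diff_seq := by
  unfold Claim_raises_diff_seq
  exact ⟨by rintro l1 l2 _ h hp; exact hp h, by decide⟩
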